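-- pv_equiv track=rewrite | github.com/bilbosf/aoc-2020 | src/advent6-pt2.py | get_question_set
-- ===== SOURCE A (Python) =====
-- def get_question_set(group):
--     '''
--     Given a group as a list of strings, each representing a person's answers, returns a set with
--     all the questions to each everyone in the group answered yes
--     '''
--     question_set = set()
--     alphabet = "abcdefghijklmnopqrstuvwxyz"
--
--     for char in alphabet:
--         is_valid = True
--         for line in group:
--             if not char in line:
--                 is_valid = False
--                 break
--         if is_valid:
--             question_set.add(char)
--
--     return question_set
-- ===== SOURCE B (Python) =====
-- def get_question_set(group):
--     '''
--     Given a group as a list of strings, each representing a person's answers, returns a set with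
--     all the questions to each everyone in the group answered yes
--     '''
--     question_set = set("abcdefghijklmnopqrstuvwxyz")
--     for line in group:
--         question_set &= set(line)
--     return question_set
-- ===== Notes on version B (the rewrite author's own statement) =====
-- stated objective: simpler
-- what changed: Replaces A's 26-letter outer loop with an inner per-line membership scan by a single pass over the group's lines that intersects an alphabet-seeded set with each line's character set.
import Mathlib
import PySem

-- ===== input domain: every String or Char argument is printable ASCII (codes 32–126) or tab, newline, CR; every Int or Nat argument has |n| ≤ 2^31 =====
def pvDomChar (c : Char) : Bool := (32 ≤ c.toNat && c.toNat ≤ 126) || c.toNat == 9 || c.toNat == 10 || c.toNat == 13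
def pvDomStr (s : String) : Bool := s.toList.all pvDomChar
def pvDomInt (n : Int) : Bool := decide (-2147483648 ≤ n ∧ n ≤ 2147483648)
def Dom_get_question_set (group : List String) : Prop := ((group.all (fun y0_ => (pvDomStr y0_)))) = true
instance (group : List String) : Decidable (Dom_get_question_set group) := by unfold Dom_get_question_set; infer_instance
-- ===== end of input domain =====

-- B replaces A's alphabet-outer/lines-inner nested loop by one pass over the lines that
-- repeatedly intersects an alphabet-seeded set with each line's character set (objective: simpler).

-- ===== PORT A =====
-- inner 'for line in group: if not char in line: is_valid = False; break' (break = early return false)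
def pvAllContain (c : Char) : List String → Bool
  | [] => true
  | line :: rest => if !(PySem.Chars.isIn [c] line.toList) then false else pvAllContain c rest

def get_question_set (group : List String) : List String :=
  "abcdefghijklmnopqrstuvwxyz".toList.foldl
    (fun qs c => if pvAllContain c group then PySem.Set.add qs (String.ofList [c]) else qs)
    PySem.Set.empty

-- ===== PORT B =====
-- set("abcdefghijklmnopqrstuvwxyz"): the 26 one-character strings
def pvAbcSet : PySem.Set String :=
  PySem.Set.ofList ("abcdefghijklmnopqrstuvwxyz".toList.map (fun c => String.ofList [c]))

def get_question_set_alt (group : List String) : List String :=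
  group.foldl
    (fun qs line => PySem.Set.inter qs (PySem.Set.ofList (line.toList.map (fun c => String.ofList [c]))))
    pvAbcSet

-- ===== PRECONDITION & SPEC =====
def Spec_get_question_set (group : List String) (out : List String) : Prop := out = get_question_set_alt group
instance (group : List String) (out : List String) : Decidable (Spec_get_question_set group out) := by unfold Spec_get_question_set; infer_instance

-- ===== CLAIM (what is proved, stated in full; the proofs are below) =====
def Claim_equal_get_question_set : Prop := ∀ (group : List String), Dom_get_question_set group → Spec_get_question_set group (get_question_set group)

-- ===== LEMMAS AND PROOFS =====

-- A's conditional-add loop from a fresh accumulator is filter-then-map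
theorem pvFoldl_add_if (q : Char → Bool) (l : List Char) (acc : List String)
    (hnd : (l.map (fun c => String.ofList [c])).Nodup)
    (hfr : ∀ c ∈ l, String.ofList [c] ∉ acc) :
    l.foldl (fun qs c => if q c then PySem.Set.add qs (String.ofList [c]) else qs) acc
      = acc ++ (l.filter q).map (fun c => String.ofList [c]) := by
  induction l generalizing acc with
  | nil => simp
  | cons a t ih =>
    simp only [List.map_cons, List.nodup_cons] at hnd
    by_cases hq : q a
    · have hadd : PySem.Set.add acc (String.ofList [a]) = acc ++ [String.ofList [a]] :=
        PySem.Set.add_of_not_mem (hfr a (by simp))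
      simp only [List.foldl_cons, hq, if_pos, hadd]
      rw [ih _ hnd.2 (by
        intro c hc
        simp only [List.mem_append, List.mem_singleton]
        rintro (h | h)
        · exact hfr c (by simp [hc]) h
        · exact hnd.1 (h ▸ List.mem_map_of_mem hc))]
      simp [hq]
    · simp only [List.foldl_cons, hq, if_neg, Bool.false_eq_true, not_false_iff]
      rw [ih _ hnd.2 (fun c hc => hfr c (by simp [hc]))]
      simp [hq]

-- B's repeated-intersection loop is one filter by "in every line"
theorem pvFoldl_inter (f : String → List String) (g : List String) (acc : List String) :
    g.foldl (fun qs line => PySem.Set.inter qs (f line)) acc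
      = acc.filter (fun x => g.all (fun line => PySem.Set.contains (f line) x)) := by
  induction g generalizing acc with
  | nil => simp
  | cons line t ih =>
    show (t.foldl _ (acc.filter fun x => PySem.Set.contains (f line) x)) = _
    rw [ih, List.filter_filter]
    congr 1
    funext x
    simp [List.all_cons, Bool.and_comm]

-- 'char in line' for a one-character needle is membership of that character,
-- which is membership of its singleton string in the line's character set
theorem pvMemLine (c : Char) (line : String) :
    PySem.Chars.isIn [c] line.toList
      = PySem.Set.contains (PySem.Set.ofList (line.toList.map (fun d => String.ofList [d]))) (String.ofList [c]) := by
  have h1 : PySem.Chars.isIn [c] line.toList = true ↔ c ∈ line.toList := by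
    rw [PySem.Chars.isIn_iff_infix, List.singleton_infix_iff]
  have h2 : PySem.Set.contains (PySem.Set.ofList (line.toList.map (fun d => String.ofList [d]))) (String.ofList [c]) = true ↔ c ∈ line.toList := by
    rw [PySem.Set.contains_iff, PySem.Set.mem_ofList, List.mem_map]
    constructor
    · rintro ⟨d, hd, he⟩
      have : d = c := by
        have := congrArg String.toList he
        simpa using this
      exact this ▸ hd
    · exact fun h => ⟨c, h, rfl⟩
  rw [Bool.eq_iff_iff, h1, h2]

-- the break-style inner loop equals List.all
theorem pvAllContain_eq_all (c : Char) (g : List String) :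
    pvAllContain c g = g.all (fun line => PySem.Chars.isIn [c] line.toList) := by
  induction g with
  | nil => rfl
  | cons line t ih =>
    simp only [pvAllContain, List.all_cons, ← ih]
    by_cases h : PySem.Chars.isIn [c] line.toList <;> simp [h]

-- ===== VERDICT (by name: the statement is the Claim_ definition above) =====
theorem get_question_set_spec : Claim_equal_get_question_set := by
  intro group _
  unfold Spec_get_question_set get_question_set get_question_set_alt pvAbcSet
  have hinj : Function.Injective (fun c : Char => String.ofList [c]) := by
    intro a b h
    simpa using congrArg String.toList h
  have hndS : (List.map (fun c => String.ofList [c]) "abcdefghijklmnopqrstuvwxyz".toList).Nodup :=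
    (by decide : ("abcdefghijklmnopqrstuvwxyz".toList).Nodup).map hinj
  rw [pvFoldl_inter]
  rw [pvFoldl_add_if _ _ _ hndS (by intro c _ h; exact absurd h (List.not_mem_nil))]
  rw [PySem.Set.ofList_eq_self_of_nodup _ hndS]
  rw [List.filter_map]
  simp only [PySem.Set.empty, List.nil_append]
  congr 1
  apply List.filter_congr
  intro c _
  rw [pvAllContain_eq_all]
  congr 1
  funext line
  exact pvMemLine c line
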